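-- pv_equiv track=rewrite | github.com/Vestenar/PythonProjects | 02_Codesignal/02_The Core/047_comfortableNumbers.py | comfortableNumbers
-- ===== SOURCE A (Python) =====
-- def comfortableNumbers(l, r):
--     mass = {}
--     ans = set()
--     for i in range(l,r+1):
--         su = s(i)
--         mass[i] = [j for j in range(i-su, i+su+1) if j != i]
--     for key in mass:
--         for val in mass[key]:
--             if val in mass and val > key:
--                 if val - s(val) <= key <= val + s(val):
--                     ans.add((key,val))
--
--     return len(ans)
--
-- def s(a):
--     s = sum(int(i) for i in str(a))
--     return s
-- ===== SOURCE B (Python) =====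
-- def comfortableNumbers(l, r):
--     D = max((s(i) for i in range(l, r + 1)), default=0)
--     total = 0
--     for d in range(1, D + 1):
--         for a in range(l, r - d + 1):
--             if s(a) >= d and s(a + d) >= d:
--                 total += 1
--     return total
--
-- def s(a):
--     s = sum(int(i) for i in str(a))
--     return s
-- ===== Notes on version B (the rewrite author's own statement) =====
-- stated objective: alternative
-- what changed: B counts the pairs by their difference: it takes D = the maximum digit sum over the range and, for each difference d in 1..D, counts the a with s(a) >= d and s(a+d) >= d, instead of A's per-number neighbour-list dict plus a deduplicating pair set; Pre_ excludes ranges containing a negative number, on which both Pythons raise ValueError.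
import Mathlib
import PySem

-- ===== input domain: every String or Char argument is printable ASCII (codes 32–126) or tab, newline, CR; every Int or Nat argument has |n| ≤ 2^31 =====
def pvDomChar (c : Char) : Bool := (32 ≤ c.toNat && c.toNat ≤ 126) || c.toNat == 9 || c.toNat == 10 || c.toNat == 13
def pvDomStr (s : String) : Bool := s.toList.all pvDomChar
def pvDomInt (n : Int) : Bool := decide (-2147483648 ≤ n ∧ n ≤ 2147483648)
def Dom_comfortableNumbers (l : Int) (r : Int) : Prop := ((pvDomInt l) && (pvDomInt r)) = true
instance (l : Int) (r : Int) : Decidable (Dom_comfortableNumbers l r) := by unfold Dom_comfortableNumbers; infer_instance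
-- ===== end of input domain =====

-- B counts the pairs by their DIFFERENCE d (precomputed digit sums, d from 1 to the maximum
-- digit sum in the range) instead of A's per-number neighbour lists plus a deduplicating pair set.

-- ===== PORT A =====
-- helper s(a): sum(int(i) for i in str(a)).  int(i) is PySem.Int.ofChars? on the one-char string;
-- within Pre_ every character of str(a) is a digit, so the `.getD 0` total form never supplies its default.
def pyS (a : Int) : Int :=
  ((PySem.Int.toChars a).map (fun c => (PySem.Int.ofChars? [c]).getD 0)).sum

def comfortableNumbers (l : Int) (r : Int) : Int :=
  let mass : PySem.Dict Int (List Int) :=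
    (PySem.List.pyRange l (r + 1) 1).foldl (fun d i =>
      let su := pyS i
      d.insert i ((PySem.List.pyRange (i - su) (i + su + 1) 1).filter (fun j => decide (j ≠ i))))
      PySem.Dict.empty
  let ans : PySem.Set (Int × Int) :=
    mass.keys.foldl (fun a key =>
      -- mass[key]: key is drawn from mass's own keys, so the KeyError branch is unreachable (getD total form)
      (mass.getD key []).foldl (fun a val =>
        if mass.contains val ∧ val > key then
          if val - pyS val ≤ key ∧ key ≤ val + pyS val then PySem.Set.add a (key, val) else a
        else a) a)
      PySem.Set.empty
  (ans.length : Int)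

-- ===== PORT B =====
def comfortableNumbers_alt (l : Int) (r : Int) : Int :=
  -- max((s(i) for i in range(l, r+1)), default=0)
  let D : Int := (PySem.List.max? ((PySem.List.pyRange l (r + 1) 1).map pyS) (fun x => x)).getD 0
  (PySem.List.pyRange 1 (D + 1) 1).foldl (fun total d =>
    (PySem.List.pyRange l (r - d + 1) 1).foldl (fun total a =>
      if pyS a ≥ d ∧ pyS (a + d) ≥ d then total + 1 else total) total) 0

-- ===== PRECONDITION & SPEC =====
-- Both Pythons call s on every element of range(l, r+1), and s raises ValueError on a negative
-- argument (int('-')); Pre_ excludes exactly the ranges containing a negative number.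
def Pre_comfortableNumbers (l : Int) (r : Int) : Prop := 0 ≤ l ∨ r < l
instance (l : Int) (r : Int) : Decidable (Pre_comfortableNumbers l r) := by
  unfold Pre_comfortableNumbers; infer_instance

def pvWitness_comfortableNumbers : Int × Int := (10, 40)

def Spec_comfortableNumbers (l : Int) (r : Int) (out : Int) : Prop := out = comfortableNumbers_alt l r
instance (l : Int) (r : Int) (out : Int) : Decidable (Spec_comfortableNumbers l r out) := by
  unfold Spec_comfortableNumbers; infer_instance

-- ===== CLAIM (what is proved, stated in full; the proofs are below) =====
def Claim_equal_comfortableNumbers : Prop := ∀ (l : Int) (r : Int), Dom_comfortableNumbers l r → Pre_comfortableNumbers l r → Spec_comfortableNumbers l r (comfortableNumbers l r)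

-- ===== LEMMAS AND PROOFS =====

-- every summand of pyS is ≥ 0: int(c) for a single char is either none (getD 0) or a Nat cast
lemma ofChars_single_getD_nonneg (c : Char) : 0 ≤ (PySem.Int.ofChars? [c]).getD 0 := by
  have key : ∀ (o : Option Nat), 0 ≤ (o.bind fun a => some ((a : Int))).getD 0 := by
    intro o; cases o <;> simp
  unfold PySem.Int.ofChars?
  by_cases hc : PySem.Int.isIntSpace c = true
  · simp [List.dropWhile, hc]; decide
  · simp [List.dropWhile, hc]
    split
    · rename_i ds heq; cases heq; decide
    · rename_i ds heq; cases heq; decide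
    · exact key _

lemma pyS_nonneg (a : Int) : 0 ≤ pyS a := by
  unfold pyS
  apply List.sum_nonneg
  intro x hx
  obtain ⟨c, _, rfl⟩ := List.mem_map.mp hx
  exact ofChars_single_getD_nonneg c

-- the dict built by "for i in xs: d[i] = f(i)" answers get? k with f k for k ∈ xs
lemma get?_foldl_insert {ν : Type} (xs : List Int) (f : Int → ν) (d : PySem.Dict Int ν) (k : Int) :
    (xs.foldl (fun d i => d.insert i (f i)) d).get? k
      = if k ∈ xs then some (f k) else d.get? k := by
  induction xs generalizing d with
  | nil => simp
  | cons x t ih =>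
    simp only [List.foldl_cons, ih, PySem.Dict.get?_insert]
    by_cases hk : k ∈ t <;> by_cases hx : k = x <;> simp [hk, hx]

-- one inner pass: "for v in vs: if p v: ans.add((k, v))" appends the fresh filtered pairs
lemma inner_fold (k : Int) (p : Int → Bool) (vs : List Int)
    (a : PySem.Set (Int × Int)) (hnd : vs.Nodup) (h : ∀ v ∈ vs, (k, v) ∉ a) :
    vs.foldl (fun a v => if p v then PySem.Set.add a (k, v) else a) a
      = a ++ (vs.filter p).map (fun v => (k, v)) := by
  induction vs generalizing a with
  | nil => simp
  | cons v t ih =>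
    simp only [List.foldl_cons, List.filter_cons]
    by_cases hp : p v = true
    · rw [if_pos hp, PySem.Set.add_of_not_mem (h v (by simp))]
      rw [ih (a ++ [(k, v)]) hnd.of_cons]
      · simp [hp]
      · intro w hw
        simp only [List.mem_append, List.mem_singleton, not_or]
        refine ⟨h w (by simp [hw]), ?_⟩
        intro hc
        have : v = w := (Prod.mk.injEq .. ▸ hc).2.symm
        exact (List.nodup_cons.mp hnd).1 (this ▸ hw)
    · rw [if_neg hp, ih a hnd.of_cons (fun w hw => h w (by simp [hw]))]
      simp [hp]

-- the whole double loop: concatenation of the per-key blocks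
lemma outer_fold (ks : List Int) (G : Int → List Int) (p : Int → Int → Bool)
    (a : PySem.Set (Int × Int))
    (hnd : ks.Nodup) (hGnd : ∀ k, (G k).Nodup) (hfresh : ∀ k ∈ ks, ∀ v, (k, v) ∉ a) :
    ks.foldl (fun a k => (G k).foldl (fun a v => if p k v then PySem.Set.add a (k, v) else a) a) a
      = a ++ ks.flatMap (fun k => ((G k).filter (p k)).map (fun v => (k, v))) := by
  induction ks generalizing a with
  | nil => simp
  | cons k t ih =>
    simp only [List.foldl_cons, List.flatMap_cons]
    rw [inner_fold k (p k) (G k) a (hGnd k) (fun v hv => hfresh k (by simp) v)]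
    rw [ih _ hnd.of_cons]
    · simp
    · intro k' hk' v
      simp only [List.mem_append, not_or]
      constructor
      · exact hfresh k' (by simp [hk']) v
      · intro hc
        obtain ⟨w, _, hw⟩ := List.mem_map.mp hc
        have : k = k' := (Prod.mk.injEq .. ▸ hw).1
        exact (List.nodup_cons.mp hnd).1 (this ▸ hk')

-- equal-membership filters of duplicate-free lists have equal counts
lemma countP_eq_countP {R1 R2 : List Int} {p1 p2 : Int → Bool} (h1 : R1.Nodup) (h2 : R2.Nodup)
    (h : ∀ x, (x ∈ R1 ∧ p1 x = true) ↔ (x ∈ R2 ∧ p2 x = true)) : R1.countP p1 = R2.countP p2 := by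
  rw [List.countP_eq_length_filter, List.countP_eq_length_filter]
  apply List.Perm.length_eq
  rw [List.perm_ext_iff_of_nodup (h1.filter _) (h2.filter _)]
  intro x
  simpa [List.mem_filter] using h x

-- proof-side names for A's two local variables (ansA recomputes massA; that costs nothing in proofs)
def massA (l : Int) (r : Int) : PySem.Dict Int (List Int) :=
  (PySem.List.pyRange l (r + 1) 1).foldl (fun d i =>
    let su := pyS i
    d.insert i ((PySem.List.pyRange (i - su) (i + su + 1) 1).filter (fun j => decide (j ≠ i))))
    PySem.Dict.empty

def ansA (l : Int) (r : Int) : PySem.Set (Int × Int) :=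
  (massA l r).keys.foldl (fun a key =>
    ((massA l r).getD key []).foldl (fun a val =>
      if (massA l r).contains val ∧ val > key then
        if val - pyS val ≤ key ∧ key ≤ val + pyS val then PySem.Set.add a (key, val) else a
      else a) a)
    PySem.Set.empty

-- the neighbour list of a key and the combined test of A's two nested ifs (with "val in mass" spelled out)
def nbr (k : Int) : List Int :=
  (PySem.List.pyRange (k - pyS k) (k + pyS k + 1) 1).filter (fun j => decide (j ≠ k))

def keepB (l r k v : Int) : Bool :=
  decide (((l ≤ v ∧ v < r + 1) ∧ v > k) ∧ (v - pyS v ≤ k ∧ k ≤ v + pyS v))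

lemma massA_get? (l r k : Int) :
    (massA l r).get? k = if k ∈ PySem.List.pyRange l (r + 1) 1 then some (nbr k) else none := by
  have h := get?_foldl_insert (PySem.List.pyRange l (r + 1) 1) nbr PySem.Dict.empty k
  simpa using h

lemma massA_keys (l r : Int) : (massA l r).keys = PySem.List.pyRange l (r + 1) 1 := by
  have h := PySem.Dict.keys_foldl_insert (κ := Int) (ν := List Int)
    (PySem.List.pyRange l (r + 1) 1) (fun _ i => nbr i) PySem.Dict.empty
  have h2 : (massA l r).keys = PySem.Set.update PySem.Dict.empty.keys (PySem.List.pyRange l (r + 1) 1) := h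
  rw [h2, PySem.Dict.keys_empty, PySem.Set.update_nil_left]
  exact PySem.Set.ofList_eq_self_of_nodup _ (PySem.List.nodup_pyRange_one _ _)

lemma massA_contains (l r v : Int) :
    ((massA l r).contains v = true) ↔ v ∈ PySem.List.pyRange l (r + 1) 1 := by
  rw [PySem.Dict.contains_eq_isSome_get?, massA_get?]
  by_cases hv : v ∈ PySem.List.pyRange l (r + 1) 1 <;> simp [hv]

lemma massA_getD (l r k : Int) (hk : k ∈ PySem.List.pyRange l (r + 1) 1) :
    (massA l r).getD k [] = nbr k := by
  rw [PySem.Dict.getD_eq_get?_getD, massA_get?]; simp [hk]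

lemma ansA_eq (l r : Int) :
    ansA l r = (PySem.List.pyRange l (r + 1) 1).flatMap
      (fun k => ((nbr k).filter (keepB l r k)).map (fun v => (k, v))) := by
  unfold ansA
  rw [massA_keys]
  rw [PySem.List.foldl_congr_mem _ _
    (fun a k => (nbr k).foldl
      (fun a v => if keepB l r k v then PySem.Set.add a (k, v) else a) a) _ ?cong]
  case cong =>
    intro acc key hkey
    rw [massA_getD l r key hkey]
    apply PySem.List.foldl_congr_mem
    intro a v _
    have hiff : (((massA l r).contains v = true) ∧ v > key) ↔ (l ≤ v ∧ v < r + 1) ∧ v > key := by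
      rw [massA_contains, PySem.List.mem_pyRange_one]
    simp only [keepB, decide_eq_true_eq]
    split_ifs <;> tauto
  · have h := outer_fold (PySem.List.pyRange l (r + 1) 1) nbr (keepB l r) PySem.Set.empty
      (PySem.List.nodup_pyRange_one _ _)
      (fun k => (PySem.List.nodup_pyRange_one _ _).filter _)
      (by intro k _ v hv; simp [PySem.Set.empty] at hv)
    simpa using h

lemma A_eq (l r : Int) :
    comfortableNumbers l r =
      ((((PySem.List.pyRange l (r + 1) 1).map
          (fun k => (nbr k).countP (keepB l r k))).sum : Nat) : Int) := by
  have h0 : comfortableNumbers l r = ((ansA l r).length : Int) := rfl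
  rw [h0, ansA_eq]
  simp [List.length_flatMap, ← List.countP_eq_length_filter, Function.comp_def]

-- proof-side name for B's local D
def maxD (l : Int) (r : Int) : Int :=
  (PySem.List.max? ((PySem.List.pyRange l (r + 1) 1).map pyS) (fun x => x)).getD 0

-- the maximum taken in B really bounds every digit sum of the range
lemma pyS_le_maxD (l r k : Int) (hk : k ∈ PySem.List.pyRange l (r + 1) 1) :
    pyS k ≤ maxD l r := by
  have hmem : pyS k ∈ (PySem.List.pyRange l (r + 1) 1).map pyS := List.mem_map_of_mem hk
  unfold maxD
  cases hmax : PySem.List.max? ((PySem.List.pyRange l (r + 1) 1).map pyS) (fun x => x) with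
  | none =>
    rw [PySem.List.max?_eq_none_iff] at hmax
    rw [hmax] at hmem; simp at hmem
  | some m =>
    have := PySem.List.max?_isMax hmax (pyS k) hmem
    simpa using this

-- B as a sum over differences of counts
lemma B_eq (l r : Int) :
    comfortableNumbers_alt l r =
      ((PySem.List.pyRange 1 (maxD l r + 1) 1).map
        (fun d => ((PySem.List.pyRange l (r - d + 1) 1).countP
          (fun a => decide (d ≤ pyS a ∧ d ≤ pyS (a + d))) : Int))).sum := by
  simp only [comfortableNumbers_alt]
  rw [show ((PySem.List.max? ((PySem.List.pyRange l (r + 1) 1).map pyS) (fun x => x)).getD 0)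
        = maxD l r from rfl]
  rw [PySem.List.foldl_congr_mem _ _
    (fun total d => total + ((PySem.List.pyRange l (r - d + 1) 1).countP
      (fun a => decide (d ≤ pyS a ∧ d ≤ pyS (a + d))) : Int)) 0 ?cong]
  case cong =>
    intro acc d _
    exact PySem.List.foldl_ite_add_one (fun a => d ≤ pyS a ∧ d ≤ pyS (a + d)) _ acc
  rw [PySem.List.foldl_add]
  simp

-- countP over a unit-step range is a Finset.Ico filter cardinality
lemma pyRange_toFinset (a b : Int) :
    (PySem.List.pyRange a b 1).toFinset = Finset.Ico a b := by
  apply Finset.ext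
  intro x
  simp [List.mem_toFinset, PySem.List.mem_pyRange_one, Finset.mem_Ico]

lemma countP_pyRange_card (a b : Int) (p : Int → Bool) :
    (PySem.List.pyRange a b 1).countP p = ((Finset.Ico a b).filter (fun x => p x)).card := by
  rw [List.countP_eq_length_filter]
  rw [← List.toFinset_card_of_nodup ((PySem.List.nodup_pyRange_one a b).filter p)]
  congr 1
  apply Finset.ext
  intro x
  simp [List.mem_toFinset, PySem.List.mem_pyRange_one, Finset.mem_Ico]

lemma sum_map_pyRange (a b : Int) (g : Int → Nat) :
    ((PySem.List.pyRange a b 1).map g).sum = ∑ x ∈ Finset.Ico a b, g x := by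
  rw [← pyRange_toFinset]
  exact (List.sum_toFinset g (PySem.List.nodup_pyRange_one a b)).symm

-- A's per-key count, re-indexed on the full range
lemma perkeyA (l r k : Int) :
    (nbr k).countP (keepB l r k)
      = ((Finset.Ico l (r + 1)).filter
          (fun v => decide (k < v ∧ v ≤ k + pyS k ∧ v - pyS v ≤ k))).card := by
  rw [← countP_pyRange_card]
  apply countP_eq_countP ((PySem.List.nodup_pyRange_one _ _).filter _)
    (PySem.List.nodup_pyRange_one _ _)
  intro x
  have h1 := pyS_nonneg x
  have h2 := pyS_nonneg k
  simp only [keepB, List.mem_filter, PySem.List.mem_pyRange_one, decide_eq_true_eq, ne_eq]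
  constructor
  · rintro ⟨⟨hr, hne⟩, ⟨⟨hlv, hvr⟩, hgt⟩, hc1, hc2⟩
    exact ⟨⟨by omega, by omega⟩, by omega, by omega, by omega⟩
  · rintro ⟨⟨hlo, hhi⟩, hk, hup, hdown⟩
    refine ⟨⟨by omega, by omega⟩, ⟨⟨by omega, by omega⟩, by omega⟩, by omega, by omega⟩

-- B's per-difference count, re-indexed on the full range (uses 1 ≤ d)
lemma perdB (l r d : Int) (hd : 1 ≤ d) :
    (PySem.List.pyRange l (r - d + 1) 1).countP
        (fun a => decide (d ≤ pyS a ∧ d ≤ pyS (a + d)))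
      = ((Finset.Ico l (r + 1)).filter
          (fun a => decide (a + d < r + 1 ∧ d ≤ pyS a ∧ d ≤ pyS (a + d)))).card := by
  rw [← countP_pyRange_card]
  apply countP_eq_countP (PySem.List.nodup_pyRange_one _ _) (PySem.List.nodup_pyRange_one _ _)
  intro x
  simp only [PySem.List.mem_pyRange_one, decide_eq_true_eq]
  constructor
  · rintro ⟨⟨h1, h2⟩, hc⟩
    exact ⟨⟨by omega, by omega⟩, by omega, hc⟩
  · rintro ⟨⟨h1, h2⟩, hlt, hc⟩
    exact ⟨⟨by omega, by omega⟩, hc⟩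

-- summing fiber cardinalities = cardinality of a filtered product
lemma sum_card_filter_product (s t : Finset Int) (p : Int → Int → Bool) :
    ∑ k ∈ s, (t.filter (fun v => p k v)).card
      = ((s ×ˢ t).filter (fun x => p x.1 x.2)).card := by
  rw [Finset.card_filter, Finset.sum_product]
  apply Finset.sum_congr rfl
  intro k _
  rw [Finset.card_filter]

-- the change of variables (k, v) ↦ (v - k, k): difference-indexed count = pair count
lemma core (l r : Int) :
    ∑ k ∈ Finset.Ico l (r + 1),
        ((Finset.Ico l (r + 1)).filter
          (fun v => decide (k < v ∧ v ≤ k + pyS k ∧ v - pyS v ≤ k))).card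
      = ∑ d ∈ Finset.Ico 1 (maxD l r + 1),
          ((Finset.Ico l (r + 1)).filter
            (fun a => decide (a + d < r + 1 ∧ d ≤ pyS a ∧ d ≤ pyS (a + d)))).card := by
  rw [sum_card_filter_product, sum_card_filter_product]
  refine Finset.card_bij' (fun x _ => (x.2 - x.1, x.1)) (fun y _ => (y.2, y.2 + y.1)) ?hi ?hj ?li ?ri
  case hi =>
    rintro ⟨k, v⟩ hx
    simp only [Finset.mem_filter, Finset.mem_product, Finset.mem_Ico, decide_eq_true_eq] at hx ⊢
    obtain ⟨⟨⟨hk1, hk2⟩, hv1, hv2⟩, hkv, hup, hdown⟩ := hx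
    have hle : pyS k ≤ maxD l r := pyS_le_maxD l r k (by rw [PySem.List.mem_pyRange_one]; omega)
    refine ⟨⟨⟨by omega, by omega⟩, by omega, by omega⟩, by omega, by omega, ?_⟩
    have : k + (v - k) = v := by omega
    rw [this]; omega
  case hj =>
    rintro ⟨d, a⟩ hy
    simp only [Finset.mem_filter, Finset.mem_product, Finset.mem_Ico, decide_eq_true_eq] at hy ⊢
    obtain ⟨⟨⟨hd1, hd2⟩, ha1, ha2⟩, hlt, hsa, hsad⟩ := hy
    refine ⟨⟨⟨by omega, by omega⟩, by omega, by omega⟩, by omega, by omega, by omega⟩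
  case li =>
    rintro ⟨k, v⟩ _
    simp only [Prod.mk.injEq]
    constructor <;> first | trivial | omega
  case ri =>
    rintro ⟨d, a⟩ _
    simp only [Prod.mk.injEq]
    constructor <;> first | trivial | omega

-- ===== VERDICT (by name: the statement is the Claim_ definition above) =====
theorem comfortableNumbers_spec : Claim_equal_comfortableNumbers := by
  intro l r _ _
  unfold Spec_comfortableNumbers
  rw [A_eq, B_eq]
  have hA : ((PySem.List.pyRange l (r + 1) 1).map
      (fun k => (nbr k).countP (keepB l r k))).sum
      = ∑ k ∈ Finset.Ico l (r + 1),
          ((Finset.Ico l (r + 1)).filter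
            (fun v => decide (k < v ∧ v ≤ k + pyS k ∧ v - pyS v ≤ k))).card := by
    rw [sum_map_pyRange]
    apply Finset.sum_congr rfl
    intro k _
    exact perkeyA l r k
  have hB : ((PySem.List.pyRange 1 (maxD l r + 1) 1).map
      (fun d => ((PySem.List.pyRange l (r - d + 1) 1).countP
        (fun a => decide (d ≤ pyS a ∧ d ≤ pyS (a + d))) : Nat))).sum
      = ∑ d ∈ Finset.Ico 1 (maxD l r + 1),
          ((Finset.Ico l (r + 1)).filter
            (fun a => decide (a + d < r + 1 ∧ d ≤ pyS a ∧ d ≤ pyS (a + d)))).card := by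
    rw [sum_map_pyRange]
    apply Finset.sum_congr rfl
    intro d hd
    rw [Finset.mem_Ico] at hd
    exact perdB l r d hd.1
  rw [hA, core l r, ← hB]
  rw [Nat.cast_list_sum, List.map_map]
  rfl
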